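-- pv_equiv track=rewrite | github.com/YeRuicheng/IBI1_2025-26 | Practical7/stop_codons.py | find_in_frame_stop_codons
-- ===== SOURCE A (Python) =====
-- def find_in_frame_stop_codons(seq):
--     """Find in-frame stop codons (TAA, TAG, TGA) after ATG"""
--     stops = ["TAA", "TAG", "TGA"]
--     found = set()
--     for i in range(len(seq) - 2):
--         if seq[i:i+3] == "ATG":
--             for j in range(i, len(seq) - 2, 3):
--                 codon = seq[j:j+3]
--                 if codon in stops:
--                     found.add(codon)
--             break
--     return sorted(list(found))
-- ===== SOURCE B (Python) =====
-- def find_in_frame_stop_codons(seq):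
--     """Find in-frame stop codons (TAA, TAG, TGA) after ATG"""
--     start = seq.find("ATG")
--     if start == -1:
--         return []
--     result = []
--     for stop in ("TAA", "TAG", "TGA"):
--         p = seq.find(stop, start)
--         while p != -1:
--             if (p - start) % 3 == 0:
--                 result.append(stop)
--                 break
--             p = seq.find(stop, p + 1)
--     return result
-- ===== Notes on version B (the rewrite author's own statement) =====
-- stated objective: faster
-- what changed: B inverts the traversal: instead of scanning every position for ATG and then every in-frame triplet, collecting matches into a set that is sorted at the end, B asks for each of the three stop codons in turn whether it occurs in frame, hopping between its occurrences with str.find(stop, pos) and checking (pos - start) % 3 == 0, appending in the already-sorted fixed order with no set and no sort.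
import Mathlib
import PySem

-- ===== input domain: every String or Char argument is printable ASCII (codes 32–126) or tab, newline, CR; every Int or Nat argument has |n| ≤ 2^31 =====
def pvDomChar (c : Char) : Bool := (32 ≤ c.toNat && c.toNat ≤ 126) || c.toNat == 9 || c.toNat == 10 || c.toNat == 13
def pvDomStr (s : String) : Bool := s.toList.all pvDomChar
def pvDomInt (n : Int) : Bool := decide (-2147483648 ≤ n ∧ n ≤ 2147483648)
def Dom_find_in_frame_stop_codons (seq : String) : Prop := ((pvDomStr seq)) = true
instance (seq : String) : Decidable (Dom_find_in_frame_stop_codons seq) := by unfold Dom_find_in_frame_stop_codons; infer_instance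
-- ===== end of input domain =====

-- B inverts A's strategy: instead of scanning every in-frame position and collecting matching codons
-- into a set that is sorted at the end, B asks, for each of the three stop codons in turn, whether it
-- OCCURS in frame, hopping between its occurrences with str.find; no set and no sort (objective:
-- faster by a constant factor, measured).

-- ===== PORT A =====
-- the three stop codons, as in A's 'stops'
def pvStops : List String := ["TAA", "TAG", "TGA"]

-- A's inner loop: 'for j in range(i, len(seq)-2, 3): codon = seq[j:j+3]; if codon in stops: found.add(codon)'
def pvInnerA (seq : String) (js : List Int) (found : PySem.Set String) : PySem.Set String :=
  js.foldl (fun found j =>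
    let codon := PySem.Str.slice seq (some j) (some (j + 3))
    if codon ∈ pvStops then PySem.Set.add found codon else found) found

-- A's outer loop with its break: the first i with seq[i:i+3] == "ATG" runs the inner loop and returns
def pvOuterA (seq : String) : List Int → List String
  | [] => PySem.List.sorted (PySem.Set.empty : PySem.Set String) (fun x => x) false
  | i :: rest =>
    if PySem.Str.slice seq (some i) (some (i + 3)) = "ATG" then
      PySem.List.sorted
        (pvInnerA seq (PySem.List.pyRange i (PySem.Str.len seq - 2) 3) PySem.Set.empty)
        (fun x => x) false
    else pvOuterA seq rest

def find_in_frame_stop_codons (seq : String) : List String :=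
  pvOuterA seq (PySem.List.pyRange 0 (PySem.Str.len seq - 2) 1)

-- ===== PORT B =====
-- B's 'while p != -1' loop for one stop codon: seq.find(stop, p); in-frame -> True; else retry from
-- p+1.  The Nat counter is fuel making the loop total; the caller passes len(seq)+1, enough for every
-- run since each retry moves the search position strictly forward.
def pvSearch (seq stop : String) (start : Int) : Nat → Int → Bool
  | 0, _ => false
  | Nat.succ fuel, p =>
    let q := PySem.Str.findFrom seq stop p
    if q = -1 then false
    else if PySem.Int.mod (q - start) 3 = 0 then true
    else pvSearch seq stop start fuel (q + 1)

def find_in_frame_stop_codons_alt (seq : String) : List String :=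
  let start := PySem.Str.find seq "ATG"
  if start = -1 then []
  else pvStops.foldl (fun result stop =>
    if pvSearch seq stop start (seq.toList.length + 1) start then result ++ [stop] else result) []

-- ===== PRECONDITION & SPEC =====
def Spec_find_in_frame_stop_codons (seq : String) (out : List String) : Prop := out = find_in_frame_stop_codons_alt seq
instance (seq : String) (out : List String) : Decidable (Spec_find_in_frame_stop_codons seq out) := by unfold Spec_find_in_frame_stop_codons; infer_instance

-- ===== CLAIM (what is proved, stated in full; the proofs are below) =====
def Claim_equal_find_in_frame_stop_codons : Prop := ∀ (seq : String), Dom_find_in_frame_stop_codons seq → Spec_find_in_frame_stop_codons seq (find_in_frame_stop_codons seq)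

-- ===== LEMMAS AND PROOFS =====

-- a 3-slice equals a 3-letter word iff that word is a prefix of the drop at a nonnegative index
lemma pvSlice_eq_iff (seq : String) (i : Int) (hi : 0 ≤ i) (w : String) (hw : w.toList.length = 3) :
    PySem.Str.slice seq (some i) (some (i + 3)) = w ↔ w.toList <+: seq.toList.drop i.toNat := by
  rw [← String.toList_inj, PySem.Str.toList_slice]
  simp only [PySem.Chars.slice]
  rw [PySem.List.slice_toNat _ hi (by omega)]
  have h3 : (i + 3).toNat - i.toNat = 3 := by omega
  rw [h3, List.prefix_iff_eq_take, hw]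
  exact eq_comm

-- A's outer loop passes over indices whose 3-slice is not "ATG"
lemma pvOuterA_skip (seq : String) (is1 is2 : List Int)
    (h : ∀ i ∈ is1, PySem.Str.slice seq (some i) (some (i + 3)) ≠ "ATG") :
    pvOuterA seq (is1 ++ is2) = pvOuterA seq is2 := by
  induction is1 with
  | nil => rfl
  | cons a l ih =>
    simp only [List.cons_append, pvOuterA]
    rw [if_neg (h a (by simp))]
    exact ih (fun i hi => h i (by simp [hi]))

-- membership in A's inner-loop set
lemma pvMem_innerA (seq : String) (js : List Int) (x : String) : ∀ (s : PySem.Set String),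
    x ∈ pvInnerA seq js s ↔
      x ∈ s ∨ ∃ j ∈ js, PySem.Str.slice seq (some j) (some (j + 3)) = x ∧ x ∈ pvStops := by
  induction js with
  | nil => intro s; simp [pvInnerA]
  | cons a l ih =>
    intro s
    show x ∈ pvInnerA seq l
        (if PySem.Str.slice seq (some a) (some (a + 3)) ∈ pvStops then
          PySem.Set.add s (PySem.Str.slice seq (some a) (some (a + 3))) else s) ↔ _
    rw [ih]
    by_cases hm : PySem.Str.slice seq (some a) (some (a + 3)) ∈ pvStops
    · rw [if_pos hm]
      simp only [PySem.Set.mem_add, List.exists_mem_cons_iff]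
      constructor
      · rintro ((h | rfl) | h)
        · exact Or.inl h
        · exact Or.inr (Or.inl ⟨rfl, hm⟩)
        · exact Or.inr (Or.inr h)
      · rintro (h | (⟨h1, _⟩ | h))
        · exact Or.inl (Or.inl h)
        · exact Or.inl (Or.inr h1.symm)
        · exact Or.inr h
    · rw [if_neg hm]
      simp only [List.exists_mem_cons_iff]
      constructor
      · rintro (h | h)
        · exact Or.inl h
        · exact Or.inr (Or.inr h)
      · rintro (h | (⟨h1, h2⟩ | h))
        · exact Or.inl h
        · exact absurd (h1 ▸ h2) hm
        · exact Or.inr h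

-- A's inner-loop set stays duplicate-free
lemma pvNodup_innerA (seq : String) (js : List Int) : ∀ (s : PySem.Set String), s.Nodup →
    (pvInnerA seq js s).Nodup := by
  induction js with
  | nil => intro s h; exact h
  | cons a l ih =>
    intro s h
    show (pvInnerA seq l
        (if PySem.Str.slice seq (some a) (some (a + 3)) ∈ pvStops then
          PySem.Set.add s (PySem.Str.slice seq (some a) (some (a + 3))) else s)).Nodup
    apply ih
    split_ifs with hc
    · exact PySem.Set.nodup_add _ _ h
    · exact h

-- a successful find is nonnegative, lands at or after the start index, and within the string
lemma pvFindFrom_bound (s stop : List Char) (p : Int)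
    (h : PySem.Chars.findFrom s stop p ≠ -1) :
    0 ≤ PySem.Chars.findFrom s stop p ∧
      p.toNat ≤ (PySem.Chars.findFrom s stop p).toNat ∧
      (PySem.Chars.findFrom s stop p).toNat ≤ s.length ∧ p.toNat ≤ s.length := by
  unfold PySem.Chars.findFrom at *
  simp only at *
  split_ifs at h ⊢ with h1 h2 h3 h4 h5 h6 h7 h8
  all_goals try exact absurd rfl h
  all_goals
    (first
      | (have hr := PySem.Chars.neg_one_le_find (List.drop (p + (s.length:Int)).toNat (List.take (Int.toNat (s.length:Int)) s)) stop
         have hle := PySem.Chars.find_le_length (List.drop (p + (s.length:Int)).toNat (List.take (Int.toNat (s.length:Int)) s)) stop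
         rw [List.length_drop, List.length_take] at hle
         simp only [Int.toNat_natCast, min_self] at *
         omega)
      | (have hr := PySem.Chars.neg_one_le_find (List.drop p.toNat (List.take (Int.toNat (s.length:Int)) s)) stop
         have hle := PySem.Chars.find_le_length (List.drop p.toNat (List.take (Int.toNat (s.length:Int)) s)) stop
         rw [List.length_drop, List.length_take] at hle
         simp only [Int.toNat_natCast, min_self] at *
         omega)
      | (have hr := PySem.Chars.neg_one_le_find (List.drop (Int.toNat 0) (List.take (Int.toNat (s.length:Int)) s)) stop
         have hle := PySem.Chars.find_le_length (List.drop (Int.toNat 0) (List.take (Int.toNat (s.length:Int)) s)) stop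
         rw [List.length_drop, List.length_take] at hle
         simp only [Int.toNat_natCast, min_self] at *
         omega))

-- find from an index past the end of the string yields -1
lemma pvFindFrom_gt (s stop : List Char) (p : Int) (h : (s.length : Int) < p) :
    PySem.Chars.findFrom s stop p = -1 := by
  unfold PySem.Chars.findFrom
  simp only
  split_ifs <;> first | rfl | omega

-- B's per-stop while loop returns True iff the stop codon occurs at or after p in the right frame
lemma pvSearch_iff (seq stop : String) (hstop : stop.toList ≠ []) (start : Int) :
    ∀ (fuel : Nat) (p : Int), 0 ≤ p → seq.toList.length + 1 - p.toNat ≤ fuel →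
      (pvSearch seq stop start fuel p = true ↔
        ∃ j : Nat, p ≤ (j : Int) ∧ stop.toList <+: seq.toList.drop j ∧
          PySem.Int.mod ((j : Int) - start) 3 = 0) := by
  intro fuel
  induction fuel with
  | zero =>
    intro p hp hn
    simp only [pvSearch]
    constructor
    · intro h; cases h
    rintro ⟨j, hj1, hj2, -⟩
    have hl := hj2.length_le
    rw [List.length_drop] at hl
    have : 1 ≤ stop.toList.length := List.length_pos_iff.mpr hstop
    omega
  | succ n ih =>
    intro p hp hn
    simp only [pvSearch]
    simp only [PySem.Str.findFrom_eq]
    have hcast : ((p.toNat : Int)) = p := Int.toNat_of_nonneg hp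
    by_cases hbig : (seq.toList.length : Int) < p
    · -- past the end: find fails and no occurrence exists
      rw [pvFindFrom_gt seq.toList stop.toList p hbig, if_pos rfl]
      constructor
      · intro h; cases h
      · rintro ⟨j, hj1, hj2, -⟩
        have hl := hj2.length_le
        rw [List.length_drop] at hl
        have : 1 ≤ stop.toList.length := List.length_pos_iff.mpr hstop
        omega
    · have hple : p.toNat ≤ seq.toList.length := by omega
      by_cases hq : PySem.Chars.findFrom seq.toList stop.toList p = -1
      · -- no further occurrence at all
        rw [if_pos hq]
        rw [← hcast] at hq
        have hno := (PySem.Chars.findFrom_natCast_eq_neg_one_iff seq.toList stop.toList p.toNat hple).mp hq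
        constructor
        · intro h; cases h
        · rintro ⟨j, hj1, hj2, -⟩
          exfalso
          apply hno
          rw [← PySem.Chars.isIn_iff_infix]
          apply (PySem.Chars.exists_prefix_drop_iff_isIn _ _).mp
          refine ⟨j - p.toNat, ?_⟩
          rw [List.drop_drop]
          have : p.toNat + (j - p.toNat) = j := by omega
          rw [this]
          exact hj2
      · rw [if_neg hq]
        have hb := pvFindFrom_bound seq.toList stop.toList p hq
        have hspec := PySem.Chars.findFrom_natCast_spec seq.toList stop.toList p.toNat hple
          (by rw [hcast]; exact hq)
        rw [hcast] at hspec
        set q := PySem.Chars.findFrom seq.toList stop.toList p with hqdef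
        have hq0 : 0 ≤ q := hb.1
        have hqcast : ((q.toNat : Int)) = q := Int.toNat_of_nonneg hq0
        by_cases hfr : PySem.Int.mod (q - start) 3 = 0
        · rw [if_pos hfr]
          simp only [true_iff]
          exact ⟨q.toNat, by omega, hspec.2.1, by rw [hqcast]; exact hfr⟩
        · rw [if_neg hfr]
          rw [ih (q + 1) (by omega) (by omega)]
          constructor
          · rintro ⟨j, hj1, hj2, hj3⟩
            exact ⟨j, by omega, hj2, hj3⟩
          · rintro ⟨j, hj1, hj2, hj3⟩
            refine ⟨j, ?_, hj2, hj3⟩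
            rcases lt_trichotomy j q.toNat with hlt | heq | hgt
            · exact absurd hj2 (hspec.2.2 j (by omega) hlt)
            · exfalso; apply hfr; rw [← hqcast, ← heq]; exact hj3
            · omega

-- the three stop strings each have three characters
lemma pvStops_len (x : String) (hx : x ∈ pvStops) : x.toList.length = 3 := by
  simp only [pvStops, List.mem_cons, List.not_mem_nil, or_false] at hx
  rcases hx with rfl | rfl | rfl <;> decide

-- main equivalence
theorem pvFind_spec_aux (seq : String) :
    find_in_frame_stop_codons seq = find_in_frame_stop_codons_alt seq := by
  by_cases hf : PySem.Chars.find seq.toList "ATG".toList = -1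
  · -- no "ATG" anywhere: both sides return []
    have hno : ∀ i ∈ PySem.List.pyRange 0 (PySem.Str.len seq - 2) 1,
        PySem.Str.slice seq (some i) (some (i + 3)) ≠ "ATG" := by
      intro i him hATG
      rw [PySem.List.mem_pyRange_one] at him
      rw [pvSlice_eq_iff seq i him.1 "ATG" rfl] at hATG
      have hin : PySem.Chars.isIn "ATG".toList seq.toList = true :=
        (PySem.Chars.exists_prefix_drop_iff_isIn _ _).1 ⟨i.toNat, hATG⟩
      rw [PySem.Chars.isIn_iff_infix] at hin
      exact (PySem.Chars.find_eq_neg_one_iff _ _).1 hf hin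
    have hskip0 := pvOuterA_skip seq (PySem.List.pyRange 0 (PySem.Str.len seq - 2) 1) [] hno
    rw [List.append_nil] at hskip0
    have hB : find_in_frame_stop_codons_alt seq = [] := by
      unfold find_in_frame_stop_codons_alt
      simp only [PySem.Str.find_eq]
      rw [if_pos hf]
    rw [hB]
    unfold find_in_frame_stop_codons
    rw [hskip0]
    rfl
  · -- "ATG" found, at t := seq.find("ATG")
    have h0 : 0 ≤ PySem.Chars.find seq.toList "ATG".toList := by
      have := PySem.Chars.neg_one_le_find seq.toList "ATG".toList
      omega
    set t := PySem.Chars.find seq.toList "ATG".toList with htdef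
    obtain ⟨hpre, hmin⟩ := PySem.Chars.find_spec (s := seq.toList) (sub := "ATG".toList) h0
    have hlen3 : ("ATG".toList).length = 3 := rfl
    have hlen : t.toNat + 3 ≤ seq.toList.length := by
      have h1 := hpre.length_le
      rw [hlen3, List.length_drop] at h1
      have h2 : t ≤ (seq.toList.length : Int) := PySem.Chars.find_le_length _ _
      omega
    have hfindStr : PySem.Str.find seq "ATG" = t := by
      rw [PySem.Str.find_eq]
    have hlenn : PySem.Str.len seq = ((seq.toList.length : Int)) := PySem.Str.len_eq seq
    have htn : t < (seq.toList.length : Int) - 2 := by omega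
    have hsplit : PySem.List.pyRange 0 ((seq.toList.length : Int) - 2) 1 =
        PySem.List.pyRange 0 t 1 ++ PySem.List.pyRange t ((seq.toList.length : Int) - 2) 1 :=
      PySem.List.pyRange_one_append 0 t _ h0 (by omega)
    have hskip : ∀ i ∈ PySem.List.pyRange 0 t 1,
        PySem.Str.slice seq (some i) (some (i + 3)) ≠ "ATG" := by
      intro i him hATG
      rw [PySem.List.mem_pyRange_one] at him
      rw [pvSlice_eq_iff seq i him.1 "ATG" rfl] at hATG
      exact hmin i.toNat (by omega) hATG
    have hhead : PySem.Str.slice seq (some t) (some (t + 3)) = "ATG" :=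
      (pvSlice_eq_iff seq t h0 "ATG" rfl).2 hpre
    unfold find_in_frame_stop_codons find_in_frame_stop_codons_alt
    simp only [hfindStr, hlenn]
    rw [if_neg (by omega : ¬ t = -1)]
    rw [hsplit, pvOuterA_skip _ _ _ hskip]
    rw [PySem.List.pyRange_one_cons htn]
    simp only [pvOuterA, hlenn]
    rw [if_pos hhead]
    rw [PySem.List.foldl_append_if_eq_filter (fun stop => pvSearch seq stop t (seq.toList.length + 1) t) pvStops []]
    rw [List.nil_append]
    -- the sorted set of in-frame stops IS the filter of the (strictly sorted) stop list
    apply PySem.List.sorted_eq_of_perm_of_pairwise_lt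
    · -- permutation, via membership on both nodup lists
      rw [List.perm_ext_iff_of_nodup
        (List.Nodup.filter _ (by decide : pvStops.Nodup))
        (pvNodup_innerA _ _ PySem.Set.empty List.nodup_nil)]
      intro x
      rw [List.mem_filter, pvMem_innerA]
      constructor
      · rintro ⟨hxs, hsearch⟩
        refine Or.inr ?_
        have hx3 : x.toList.length = 3 := pvStops_len x hxs
        have hxne : x.toList ≠ [] := by intro h; rw [h] at hx3; cases hx3
        obtain ⟨j, hj1, hj2, hj3⟩ :=
          (pvSearch_iff seq x hxne t (seq.toList.length + 1) t h0 (by omega)).mp hsearch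
        have hjl := hj2.length_le
        rw [hx3, List.length_drop] at hjl
        refine ⟨(j : Int), ?_, ?_, hxs⟩
        · rw [PySem.List.mem_pyRange_iff_of_pos (by omega)]
          refine ⟨hj1, by omega, ?_⟩
          rwa [← PySem.Int.mod_eq_zero_iff_dvd]
        · rw [pvSlice_eq_iff seq j (by omega) x hx3]
          simpa using hj2
      · rintro (h | ⟨j, hjmem, hje, hjs⟩)
        · cases h
        refine ⟨hjs, ?_⟩
        have hx3 : x.toList.length = 3 := pvStops_len x hjs
        have hxne : x.toList ≠ [] := by intro h; rw [h] at hx3; cases hx3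
        rw [PySem.List.mem_pyRange_iff_of_pos (by omega)] at hjmem
        obtain ⟨hj1, hj2, hj3⟩ := hjmem
        rw [pvSlice_eq_iff seq j (by omega) x hx3] at hje
        apply (pvSearch_iff seq x hxne t (seq.toList.length + 1) t h0 (by omega)).mpr
        refine ⟨j.toNat, by omega, hje, ?_⟩
        · rw [Int.toNat_of_nonneg (by omega : (0:Int) ≤ j)]
          rwa [PySem.Int.mod_eq_zero_iff_dvd]
    · -- the filtered stop list is strictly sorted
      apply List.Pairwise.sublist (List.filter_sublist (l := pvStops))
      show List.Pairwise (fun a b : String => a < b) ["TAA", "TAG", "TGA"]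
      refine List.Pairwise.cons ?_ (List.Pairwise.cons ?_ (List.pairwise_singleton _ _)) <;>
        simp only [List.mem_cons, List.not_mem_nil, or_false, forall_eq_or_imp, forall_eq] <;>
        first
          | (constructor <;> rw [String.lt_iff_toList_lt] <;> decide)
          | (rw [String.lt_iff_toList_lt]; decide)

-- ===== VERDICT (by name: the statement is the Claim_ definition above) =====
theorem find_in_frame_stop_codons_spec : Claim_equal_find_in_frame_stop_codons := by
  intro seq _
  unfold Spec_find_in_frame_stop_codons
  exact pvFind_spec_aux seq
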